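-- pv_equiv track=rewrite | github.com/AlexNetYT/WinwingGNS530 | test_winwing_cdu.py | parse_colored_text
-- ===== SOURCE A (Python) =====
-- DISPLAY_LINE_LENGTH = 24
--
-- def parse_colored_text(text, default_color="w"):
--     COLOR_MARKER_SEPARATOR = "`"
--     TARGET_LINE_LENGTH = DISPLAY_LINE_LENGTH
--     raw_text = ""
--     i = 0
--     while i < len(text):
--         if i + 1 < len(text) and text[i + 1] == COLOR_MARKER_SEPARATOR:
--             i += 2
--             continue
--         raw_text += text[i]
--         i += 1
--     if len(raw_text) < TARGET_LINE_LENGTH: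
--         text += ' ' * (TARGET_LINE_LENGTH - len(raw_text))
--     colored = []
--     current_color = default_color
--     i = 0
--     while i < len(text):
--         if i + 1 < len(text) and text[i + 1] == COLOR_MARKER_SEPARATOR:
--             current_color = text[i].lower()
--             i += 2
--             continue
--         ch = text[i]
--         colored.append([ch, current_color, 0])
--         i += 1
--     return colored
-- ===== SOURCE B (Python) =====
-- DISPLAY_LINE_LENGTH = 24
--
-- def parse_colored_text(text, default_color="w"):
--     # Single pass: build the output directly while tracking the color,
--     # then pad the output itself (no raw-length pre-pass, no re-scan of padded text).
--     out = []
--     color = default_color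
--     i = 0
--     n = len(text)
--     while i < n:
--         if i + 1 < n and text[i + 1] == "`":
--             color = text[i].lower()
--             i += 2
--         else:
--             out.append([text[i], color, 0])
--             i += 1
--     out.extend([ch, color, 0] for ch in " " * max(0, DISPLAY_LINE_LENGTH - len(out)))
--     return out
-- ===== Notes on version B (the rewrite author's own statement) =====
-- stated objective: simpler
-- what changed: Single pass that emits entries and tracks the color directly (padding the output list afterwards), instead of A's separate raw-length pre-pass followed by padding the input text and re-scanning it.
import Mathlib
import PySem

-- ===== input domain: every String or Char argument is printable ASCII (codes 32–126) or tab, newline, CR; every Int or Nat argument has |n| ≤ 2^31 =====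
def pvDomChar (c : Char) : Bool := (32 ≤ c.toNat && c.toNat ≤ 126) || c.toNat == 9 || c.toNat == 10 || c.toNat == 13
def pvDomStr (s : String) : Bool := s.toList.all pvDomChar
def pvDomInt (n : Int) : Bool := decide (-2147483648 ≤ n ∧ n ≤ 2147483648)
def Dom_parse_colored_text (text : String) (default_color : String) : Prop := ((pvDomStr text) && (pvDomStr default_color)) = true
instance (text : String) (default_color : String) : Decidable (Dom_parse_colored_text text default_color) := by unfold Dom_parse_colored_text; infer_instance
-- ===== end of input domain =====

-- B replaces A's raw-length pre-pass + padding of the input text + re-scan by a single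
-- emitting pass that tracks the color, padding the output list afterwards (simpler).


-- ===== PORT A =====
-- first while loop of A: collect the non-marker characters (raw_text)
def pvRawA : List Char → List Char
  | [] => []
  | [a] => [a]
  | a :: b :: rest =>
      if b = '`' then pvRawA rest else a :: pvRawA (b :: rest)

-- second while loop of A: emit [ch, current_color, 0] entries, updating current_color at marker pairs
def pvScanA (cur : String) : List Char → List (String × String × Int)
  | [] => []
  | [a] => [(String.singleton a, cur, 0)]
  | a :: b :: rest =>
      if b = '`' then pvScanA (String.singleton (PySem.Chars.lowerChar a)) rest
      else (String.singleton a, cur, 0) :: pvScanA cur (b :: rest)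

def parse_colored_text (text : String) (default_color : String) : List (String × String × Int) :=
  let chars := text.toList
  let raw_text := pvRawA chars
  let chars' := if raw_text.length < 24 then chars ++ List.replicate (24 - raw_text.length) ' ' else chars
  pvScanA default_color chars'

-- ===== PORT B =====
-- Source B's single while loop: accumulator of emitted entries (appended in front, reversed at the end)
-- together with the current color, returned for the padding step
def pvLoopB (color : String) (acc : List (String × String × Int)) :
    List Char → (List (String × String × Int)) × String
  | [] => (acc, color)
  | [a] => ((String.singleton a, color, 0) :: acc, color)
  | a :: b :: rest =>
      if b = '`' then pvLoopB (String.singleton (PySem.Chars.lowerChar a)) acc rest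
      else pvLoopB color ((String.singleton a, color, 0) :: acc) (b :: rest)

def parse_colored_text_alt (text : String) (default_color : String) : List (String × String × Int) :=
  let r := pvLoopB default_color [] text.toList
  let out := r.1.reverse
  out ++ List.replicate (24 - out.length) (" ", r.2, 0)

-- ===== PRECONDITION & SPEC =====
def Spec_parse_colored_text (text : String) (default_color : String) (out : List (String × String × Int)) : Prop := out = parse_colored_text_alt text default_color
instance (text : String) (default_color : String) (out : List (String × String × Int)) : Decidable (Spec_parse_colored_text text default_color out) := by unfold Spec_parse_colored_text; infer_instance

-- ===== CLAIM (what is proved, stated in full; the proofs are below) =====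
def Claim_equal_parse_colored_text : Prop := ∀ (text : String) (default_color : String), Dom_parse_colored_text text default_color → Spec_parse_colored_text text default_color (parse_colored_text text default_color)

-- ===== LEMMAS AND PROOFS =====

-- the color left behind by A's second loop / B's loop after consuming the whole list
def pvFinColor (cur : String) : List Char → String
  | [] => cur
  | [_] => cur
  | a :: b :: rest =>
      if b = '`' then pvFinColor (String.singleton (PySem.Chars.lowerChar a)) rest
      else pvFinColor cur (b :: rest)

theorem pvLoopB_eq (l : List Char) : ∀ (cur : String) (acc : List (String × String × Int)),
    pvLoopB cur acc l = ((pvScanA cur l).reverse ++ acc, pvFinColor cur l) := by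
  induction l using pvRawA.induct with
  | case1 => intro cur acc; simp [pvLoopB, pvScanA, pvFinColor]
  | case2 a => intro cur acc; simp [pvLoopB, pvScanA, pvFinColor]
  | case3 a l ih =>
      intro cur acc
      simp [pvLoopB, pvScanA, pvFinColor, ih]
  | case4 a b rest hb ih =>
      intro cur acc
      simp [pvLoopB, pvScanA, pvFinColor, hb, ih]

theorem pvScanA_length (l : List Char) : ∀ cur, (pvScanA cur l).length = (pvRawA l).length := by
  induction l using pvRawA.induct with
  | case1 => intro cur; simp [pvScanA, pvRawA]
  | case2 a => intro cur; simp [pvScanA, pvRawA]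
  | case3 a l ih =>
      intro cur; simp [pvScanA, pvRawA, ih]
  | case4 a b rest hb ih =>
      intro cur; simp [pvScanA, pvRawA, hb, ih]

-- scanning a list of plain spaces just emits space entries with the current color
theorem pvScanA_replicate_space : ∀ (k : Nat) (cur : String),
    pvScanA cur (List.replicate k ' ') = List.replicate k ((" " : String), cur, 0) := by
  intro k
  induction k using Nat.strong_induction_on with
  | _ k ih =>
    match k with
    | 0 => intro cur; simp [pvScanA]
    | 1 =>
        intro cur
        have hs : String.singleton ' ' = " " := by decide
        simp [pvScanA, hs]
    | (m + 2) =>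
        intro cur
        have h2 : List.replicate (m + 2) ' ' = ' ' :: ' ' :: List.replicate m ' ' := by
          simp [List.replicate_succ]
        have h' : (' ' : Char) ≠ '`' := by decide
        have hrep : (' ' : Char) :: List.replicate m ' ' = List.replicate (m + 1) ' ' := by
          simp [List.replicate_succ]
        have hs : String.singleton ' ' = " " := by decide
        rw [h2]
        simp only [pvScanA, h', if_neg, not_false_iff, hs]
        rw [hrep, ih (m + 1) (by omega)]
        simp [List.replicate_succ]

-- appending spaces to the scanned text appends space entries colored with the final color
theorem pvScanA_append_spaces (l : List Char) : ∀ (cur : String) (k : Nat),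
    pvScanA cur (l ++ List.replicate k ' ') =
      pvScanA cur l ++ List.replicate k ((" " : String), pvFinColor cur l, 0) := by
  induction l using pvRawA.induct with
  | case1 =>
      intro cur k; simp [pvScanA, pvFinColor, pvScanA_replicate_space]
  | case2 a =>
      intro cur k
      cases k with
      | zero => simp [pvScanA, pvFinColor]
      | succ m =>
        have h' : (' ' : Char) ≠ '`' := by decide
        have hrep : (' ' : Char) :: List.replicate m ' ' = List.replicate (m + 1) ' ' := by
          simp [List.replicate_succ]
        simp only [List.cons_append, List.nil_append, List.replicate_succ]
        simp only [pvScanA, h', if_neg, not_false_iff]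
        rw [hrep, pvScanA_replicate_space]
        simp [pvFinColor, List.replicate_succ]
  | case3 a l ih =>
      intro cur k
      simp only [List.cons_append]
      simp [pvScanA, pvFinColor, ih]
  | case4 a b rest hb ih =>
      intro cur k
      have hA : ∀ (t : List Char), pvScanA cur (a :: b :: t) =
          (String.singleton a, cur, 0) :: pvScanA cur (b :: t) := fun t => by simp [pvScanA, hb]
      have hC : pvFinColor cur (a :: b :: rest) = pvFinColor cur (b :: rest) := by
        simp [pvFinColor, hb]
      have h1 := ih cur k
      simp only [List.cons_append] at h1 ⊢
      rw [hA, hA, hC, h1]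
      simp [List.cons_append]

-- ===== VERDICT (by name: the statement is the Claim_ definition above) =====
theorem parse_colored_text_spec : Claim_equal_parse_colored_text := by
  intro text default_color _
  unfold Spec_parse_colored_text parse_colored_text parse_colored_text_alt
  rw [pvLoopB_eq]
  simp only [List.append_nil, List.reverse_reverse]
  rw [pvScanA_length]
  by_cases h : (pvRawA text.toList).length < 24
  · simp only [h, if_pos]
    rw [pvScanA_append_spaces]
  · have h0 : 24 - (pvRawA text.toList).length = 0 := by omega
    simp [h, h0]
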